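-- pv_equiv track=rewrite | github.com/iamweihang/npuzzle | npuzzle/src/hint/hint_kxk.py | _neighbors_segment
-- ===== SOURCE A (Python) =====
-- from typing import List, Tuple, Iterable, Optional
--
-- def _neighbors_segment(state: Tuple[int,...], n: int) -> Iterable[Tuple[Tuple[int,...], int]]:
--     """
--     生成所有一次「段滑动」邻居。
--     返回 (next_state, moved_index)：
--     - moved_index 表示用户若点击该 index 的格子，就会产生这个 next_state（仅用于调试/打分）。
--     规则：
--     - 空格与同一行/列的任一格均可选择，选中后空格会与路径上所有格按方向整体交换（整段平移）。
--     """
--     s_list = list(state)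
--     z = s_list.index(0)
--     br, bc = divmod(z, n)
--
--     # 同一行
--     # 左侧 -> 往右推
--     for c in range(bc-1, -1, -1):
--         lst = s_list[:]
--         # c..bc-1 右移一格，空格到 c
--         for cc in range(bc, c, -1):
--             lst[br*n + cc] = lst[br*n + (cc-1)]
--         lst[br*n + c] = 0
--         yield (tuple(lst), br*n + c)
--
--     # 右侧 -> 往左推
--     for c in range(bc+1, n):
--         lst = s_list[:]
--         for cc in range(bc, c):
--             lst[br*n + cc] = lst[br*n + (cc+1)]
--         lst[br*n + c] = 0
--         yield (tuple(lst), br*n + c)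
--
--     # 同一列
--     # 上侧 -> 往下推
--     for r in range(br-1, -1, -1):
--         lst = s_list[:]
--         for rr in range(br, r, -1):
--             lst[rr*n + bc] = lst[(rr-1)*n + bc]
--         lst[r*n + bc] = 0
--         yield (tuple(lst), r*n + bc)
--
--     # 下侧 -> 往上推
--     for r in range(br+1, n):
--         lst = s_list[:]
--         for rr in range(br, r):
--             lst[rr*n + bc] = lst[(rr+1)*n + bc]
--         lst[r*n + bc] = 0
--         yield (tuple(lst), r*n + bc)
-- ===== SOURCE B (Python) =====
-- def _neighbors_segment(state, n):
--     s = list(state)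
--     z = s.index(0)
--     br, bc = divmod(z, n)
--     for dz, steps in ((-1, bc), (1, n - 1 - bc), (-n, br), (n, n - 1 - br)):
--         cur = s[:]
--         b = z
--         for _ in range(steps):
--             nb = b + dz
--             cur[b], cur[nb] = cur[nb], cur[b]
--             b = nb
--             yield (tuple(cur), nb)
-- ===== Notes on version B (the rewrite author's own statement) =====
-- stated objective: alternative
-- what changed: B replaces A's per-target fresh-copy-and-segment-shift inner loop by one incremental walk per direction that moves the blank a single adjacent swap at a time, snapshotting after each swap.
import Mathlib
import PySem

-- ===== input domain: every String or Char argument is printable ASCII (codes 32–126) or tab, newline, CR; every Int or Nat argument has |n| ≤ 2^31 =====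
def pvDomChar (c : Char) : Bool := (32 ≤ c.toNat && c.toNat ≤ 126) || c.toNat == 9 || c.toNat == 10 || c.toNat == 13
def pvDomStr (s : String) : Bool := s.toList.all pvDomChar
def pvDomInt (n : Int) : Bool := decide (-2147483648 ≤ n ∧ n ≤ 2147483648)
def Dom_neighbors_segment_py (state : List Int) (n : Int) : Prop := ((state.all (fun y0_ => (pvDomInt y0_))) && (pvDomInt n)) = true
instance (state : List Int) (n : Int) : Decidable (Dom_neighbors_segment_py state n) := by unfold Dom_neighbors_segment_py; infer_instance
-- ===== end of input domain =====

-- B generates the same segment-slide neighbors by walking the blank one adjacent swap at a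
-- time per direction instead of A's fresh copy-and-segment-shift per target cell.

-- ===== PORT A =====
-- Literal transliteration of A. pySetD/pyGetD are exact on the in-range indices admitted by
-- Pre_; where Python raises (0 not in state / n == 0 / an index ≥ len) Pre_ excludes the input.
def neighbors_segment_py (state : List Int) (n : Int) : List (List Int × Int) :=
  let s_list := state
  match PySem.List.index? s_list 0 with
  | none => []                                  -- ValueError: 0 not in state (excluded by Pre_)
  | some z =>
    match PySem.Int.divmod? (z : Int) n with
    | none => []                                -- ZeroDivisionError: n = 0 (excluded by Pre_)
    | some (br, bc) =>
      let left := (PySem.List.pyRange (bc - 1) (-1) (-1)).map (fun c =>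
        let lst := (PySem.List.pyRange bc c (-1)).foldl
          (fun lst cc => PySem.List.pySetD lst (br * n + cc)
            (PySem.List.pyGetD lst (br * n + (cc - 1)) 0)) s_list
        let lst2 := PySem.List.pySetD lst (br * n + c) 0
        (lst2, br * n + c))
      let right := (PySem.List.pyRange (bc + 1) n 1).map (fun c =>
        let lst := (PySem.List.pyRange bc c 1).foldl
          (fun lst cc => PySem.List.pySetD lst (br * n + cc)
            (PySem.List.pyGetD lst (br * n + (cc + 1)) 0)) s_list
        let lst2 := PySem.List.pySetD lst (br * n + c) 0
        (lst2, br * n + c))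
      let up := (PySem.List.pyRange (br - 1) (-1) (-1)).map (fun r =>
        let lst := (PySem.List.pyRange br r (-1)).foldl
          (fun lst rr => PySem.List.pySetD lst (rr * n + bc)
            (PySem.List.pyGetD lst ((rr - 1) * n + bc) 0)) s_list
        let lst2 := PySem.List.pySetD lst (r * n + bc) 0
        (lst2, r * n + bc))
      let down := (PySem.List.pyRange (br + 1) n 1).map (fun r =>
        let lst := (PySem.List.pyRange br r 1).foldl
          (fun lst rr => PySem.List.pySetD lst (rr * n + bc)
            (PySem.List.pyGetD lst ((rr + 1) * n + bc) 0)) s_list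
        let lst2 := PySem.List.pySetD lst (r * n + bc) 0
        (lst2, r * n + bc))
      left ++ right ++ up ++ down

-- ===== PORT B =====
-- B's inner loop: move the blank from b to b+dz by one adjacent swap, `steps` times,
-- recording (snapshot, new blank position) after each swap.
def pvWalk (cur : List Int) (b dz : Int) : Nat → List (List Int × Int)
  | 0 => []
  | Nat.succ steps =>
    let nb := b + dz
    let cur' := PySem.List.pySetD (PySem.List.pySetD cur b (PySem.List.pyGetD cur nb 0)) nb
      (PySem.List.pyGetD cur b 0)
    (cur', nb) :: pvWalk cur' nb dz steps

def neighbors_segment_py_alt (state : List Int) (n : Int) : List (List Int × Int) :=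
  let s := state
  match PySem.List.index? s 0 with
  | none => []                                  -- ValueError (excluded by Pre_)
  | some z =>
    match PySem.Int.divmod? (z : Int) n with
    | none => []                                -- ZeroDivisionError (excluded by Pre_)
    | some (br, bc) =>
      ([(-1, bc), (1, n - 1 - bc), (-n, br), (n, n - 1 - br)] : List (Int × Int)).flatMap
        (fun p => pvWalk s (z : Int) p.1 p.2.toNat)

-- ===== PRECONDITION & SPEC =====
-- Pre_ is exactly the set of inputs on which Python A returns normally: 0 must occur in state,
-- n must be nonzero, and (for n > 0) the largest cell index the right/down loops touch must be
-- inside the list; on every other input A raises (ValueError, ZeroDivisionError or IndexError).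
def Pre_neighbors_segment_py (state : List Int) (n : Int) : Prop :=
  (0 : Int) ∈ state ∧ n ≠ 0 ∧
  (0 < n →
    (PySem.Int.mod (state.idxOf 0 : Int) n = n - 1 ∨
      PySem.Int.floordiv (state.idxOf 0 : Int) n * n + (n - 1) < (state.length : Int)) ∧
    (PySem.Int.floordiv (state.idxOf 0 : Int) n = n - 1 ∨
      (n - 1) * n + PySem.Int.mod (state.idxOf 0 : Int) n < (state.length : Int)))
instance (state : List Int) (n : Int) : Decidable (Pre_neighbors_segment_py state n) := by
  unfold Pre_neighbors_segment_py; infer_instance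

def pvWitness_neighbors_segment_py : List Int × Int := ([1, 0, 2, 3], 2)

def Spec_neighbors_segment_py (state : List Int) (n : Int) (out : List (List Int × Int)) : Prop :=
  out = neighbors_segment_py_alt state n
instance (state : List Int) (n : Int) (out : List (List Int × Int)) :
    Decidable (Spec_neighbors_segment_py state n out) := by
  unfold Spec_neighbors_segment_py; infer_instance

-- ===== CLAIM (what is proved, stated in full; the proofs are below) =====
def Claim_equal_neighbors_segment_py : Prop := ∀ (state : List Int) (n : Int),
  Dom_neighbors_segment_py state n → Pre_neighbors_segment_py state n →
  Spec_neighbors_segment_py state n (neighbors_segment_py state n)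

-- ===== LEMMAS AND PROOFS =====

-- A's inner shift loop, abstracted: step m writes the cell at offset m (along stride dz from
-- the blank z) with the cell at offset m+1; pvShift s z dz k is A's list after sliding a
-- segment of k cells toward the blank and clearing the far cell.
def pvStep (z dz : Int) (lst : List Int) (m : Nat) : List Int :=
  PySem.List.pySetD lst (z + (m : Int) * dz) (PySem.List.pyGetD lst (z + ((m : Int) + 1) * dz) 0)

def pvShift (s : List Int) (z dz : Int) (k : Nat) : List Int :=
  PySem.List.pySetD ((List.range k).foldl (pvStep z dz) s) (z + (k : Int) * dz) 0

lemma pvFoldStep_length (z dz : Int) : ∀ (l : List Nat) (s : List Int),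
    (l.foldl (pvStep z dz) s).length = s.length := by
  intro l
  induction l with
  | nil => intro s; rfl
  | cons x xs ih =>
    intro s
    simp only [List.foldl_cons, ih, pvStep, PySem.List.length_pySetD]

lemma pvGet_setD_ne (xs : List Int) (i j v : Int) (hi : 0 ≤ i) (hj0 : 0 ≤ j)
    (hjl : j < (xs.length : Int)) (hne : i ≠ j) :
    PySem.List.pyGetD (PySem.List.pySetD xs i v) j 0 = PySem.List.pyGetD xs j 0 := by
  rw [PySem.List.pySetD_of_nonneg xs v hi,
    PySem.List.pyGetD_eq_getElem _ 0 hj0 (by simpa using hjl),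
    PySem.List.pyGetD_eq_getElem _ 0 hj0 hjl]
  exact List.getElem_set_ne (by omega) _

lemma pvGet_setD_self (xs : List Int) (i v : Int) (hi : 0 ≤ i) (hil : i < (xs.length : Int)) :
    PySem.List.pyGetD (PySem.List.pySetD xs i v) i 0 = v := by
  rw [PySem.List.pySetD_of_nonneg xs v hi,
    PySem.List.pyGetD_eq_getElem _ 0 hi (by simpa using hil)]
  exact List.getElem_set_self _

lemma pvSetD_setD (xs : List Int) (i v w : Int) (hi : 0 ≤ i) :
    PySem.List.pySetD (PySem.List.pySetD xs i v) i w = PySem.List.pySetD xs i w := by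
  rw [PySem.List.pySetD_of_nonneg xs v hi, PySem.List.pySetD_of_nonneg _ w hi,
    PySem.List.pySetD_of_nonneg xs w hi, List.set_set]

-- the crux: sliding one cell further = one more adjacent blank swap on the slid list
lemma pvShift_succ (s : List Int) (z dz : Int) (k : Nat) (hdz : dz ≠ 0)
    (h0 : 0 ≤ z + (k : Int) * dz) (h1 : z + (k : Int) * dz < (s.length : Int))
    (h2 : 0 ≤ z + ((k : Int) + 1) * dz) (h3 : z + ((k : Int) + 1) * dz < (s.length : Int)) :
    pvShift s z dz (k + 1) =
      PySem.List.pySetD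
        (PySem.List.pySetD (pvShift s z dz k) (z + (k : Int) * dz)
          (PySem.List.pyGetD (pvShift s z dz k) (z + ((k : Int) + 1) * dz) 0))
        (z + ((k : Int) + 1) * dz)
        (PySem.List.pyGetD (pvShift s z dz k) (z + (k : Int) * dz) 0) := by
  have hne : z + (k : Int) * dz ≠ z + ((k : Int) + 1) * dz := by
    intro h
    apply hdz
    nlinarith [h]
  have hF1 : ((((List.range k).foldl (pvStep z dz) s)).length : Int) = (s.length : Int) := by
    rw [pvFoldStep_length]
  conv_rhs => rw [pvShift]
  rw [pvGet_setD_ne _ _ _ _ h0 h2 (by rw [hF1]; exact h3) hne,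
    pvGet_setD_self _ _ _ h0 (by rw [hF1]; exact h1),
    pvSetD_setD _ _ _ _ h0]
  rw [pvShift, List.range_succ, List.foldl_append, List.foldl_cons, List.foldl_nil]
  simp only [pvStep]
  push_cast
  ring_nf

lemma pvShift_zero (s : List Int) (zN : Nat) (dz : Int) (hlt : zN < s.length)
    (hv : s[zN] = 0) : pvShift s (zN : Int) dz 0 = s := by
  unfold pvShift
  simp only [List.range_zero, List.foldl_nil, Nat.cast_zero, zero_mul, add_zero]
  rw [PySem.List.pySetD_of_nonneg s 0 (by positivity), Int.toNat_natCast]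
  conv_lhs => rw [← hv]
  exact List.set_getElem_self hlt

-- B's walk from the k-times-slid list yields exactly the further slides, in order
lemma pvWalk_eq (s : List Int) (z dz : Int) (hdz : dz ≠ 0) : ∀ (K k : Nat),
    (∀ j : Nat, j ≤ k + K → 0 ≤ z + (j : Int) * dz ∧ z + (j : Int) * dz < (s.length : Int)) →
    pvWalk (pvShift s z dz k) (z + (k : Int) * dz) dz K =
      (List.range K).map (fun i =>
        (pvShift s z dz (k + i + 1), z + ((k : Int) + (i : Int) + 1) * dz)) := by
  intro K
  induction K with
  | zero => intro k _; rfl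
  | succ K ih =>
    intro k h
    have hk0 := h k (by omega)
    have hk1 := h (k + 1) (by omega)
    have hcast : ((k + 1 : Nat) : Int) = (k : Int) + 1 := by push_cast; ring
    rw [hcast] at hk1
    have hnb : z + (k : Int) * dz + dz = z + ((k : Int) + 1) * dz := by ring
    simp only [pvWalk]
    rw [hnb]
    rw [← pvShift_succ s z dz k hdz hk0.1 hk0.2 hk1.1 hk1.2]
    have hrec := ih (k + 1) (by intro j hj; exact h j (by omega))
    rw [hcast] at hrec
    rw [hrec, List.range_succ_eq_map, List.map_cons, List.map_map]
    refine List.cons_eq_cons.mpr ⟨?_, ?_⟩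
    · simp
    · refine List.map_congr_left (fun i _ => ?_)
      simp only [Function.comp_apply, Prod.mk.injEq]
      refine ⟨?_, ?_⟩
      · congr 1
        omega
      · push_cast
        ring

-- specialization to k = 0: B's walk from the original list
lemma pvDir (s : List Int) (zN : Nat) (dz : Int) (K : Nat) (hdz : dz ≠ 0)
    (hzl : zN < s.length) (hzv : s[zN] = 0)
    (hrange : ∀ j : Nat, j ≤ K →
      0 ≤ (zN : Int) + (j : Int) * dz ∧ (zN : Int) + (j : Int) * dz < (s.length : Int)) :
    pvWalk s (zN : Int) dz K =
      (List.range K).map (fun i =>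
        (pvShift s (zN : Int) dz (i + 1), (zN : Int) + ((i : Int) + 1) * dz)) := by
  have h0 := pvWalk_eq s (zN : Int) dz hdz K 0 (by intro j hj; exact hrange j (by omega))
  simp only [Nat.cast_zero, zero_mul, add_zero, zero_add] at h0
  rw [pvShift_zero s zN dz hzl hzv] at h0
  rw [h0]

-- A's four direction loops, each rewritten to the same canonical map over List.range
lemma pvLeftA (s : List Int) (n br bc z : Int) (hz : br * n + bc = z) :
    (PySem.List.pyRange (bc - 1) (-1) (-1)).map (fun c =>
      (PySem.List.pySetD ((PySem.List.pyRange bc c (-1)).foldl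
        (fun lst cc => PySem.List.pySetD lst (br * n + cc)
          (PySem.List.pyGetD lst (br * n + (cc - 1)) 0)) s) (br * n + c) 0, br * n + c))
    = (List.range bc.toNat).map (fun i =>
        (pvShift s z (-1) (i + 1), z + ((i : Int) + 1) * (-1))) := by
  rw [PySem.List.pyRange_neg_one, show (bc - 1 - -1).toNat = bc.toNat from by omega,
    List.map_map]
  refine List.map_congr_left (fun i hi => ?_)
  rw [List.mem_range] at hi
  simp only [Function.comp_apply]
  have hinner : PySem.List.pyRange bc (bc - 1 - (i : Int)) (-1)
      = (List.range (i + 1)).map (fun m : Nat => bc - (m : Int)) := by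
    rw [PySem.List.pyRange_neg_one,
      show (bc - (bc - 1 - (i : Int))).toNat = i + 1 from by omega]
  have hfold : ((List.range (i + 1)).map (fun m : Nat => bc - (m : Int))).foldl
      (fun lst cc => PySem.List.pySetD lst (br * n + cc)
        (PySem.List.pyGetD lst (br * n + (cc - 1)) 0)) s
      = (List.range (i + 1)).foldl (pvStep z (-1)) s := by
    rw [List.foldl_map]
    refine PySem.List.foldl_congr_mem _ _ _ _ ?_
    intro acc m _
    rw [pvStep, show br * n + (bc - (m : Int)) = z + (m : Int) * (-1) from by rw [← hz]; ring,
      show br * n + ((bc - (m : Int)) - 1) = z + ((m : Int) + 1) * (-1) from by rw [← hz]; ring]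
  rw [hinner, hfold]
  simp only [Prod.mk.injEq]
  refine ⟨?_, by rw [← hz]; ring⟩
  rw [pvShift]
  congr 1
  rw [← hz]; push_cast; ring

lemma pvRightA (s : List Int) (n br bc z : Int) (hz : br * n + bc = z) :
    (PySem.List.pyRange (bc + 1) n 1).map (fun c =>
      (PySem.List.pySetD ((PySem.List.pyRange bc c 1).foldl
        (fun lst cc => PySem.List.pySetD lst (br * n + cc)
          (PySem.List.pyGetD lst (br * n + (cc + 1)) 0)) s) (br * n + c) 0, br * n + c))
    = (List.range (n - 1 - bc).toNat).map (fun i =>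
        (pvShift s z 1 (i + 1), z + ((i : Int) + 1) * 1)) := by
  rw [PySem.List.pyRange_one, show (n - (bc + 1)).toNat = (n - 1 - bc).toNat from by omega,
    List.map_map]
  refine List.map_congr_left (fun i hi => ?_)
  rw [List.mem_range] at hi
  simp only [Function.comp_apply]
  have hinner : PySem.List.pyRange bc (bc + 1 + (i : Int)) 1
      = (List.range (i + 1)).map (fun m : Nat => bc + (m : Int)) := by
    rw [PySem.List.pyRange_one,
      show (bc + 1 + (i : Int) - bc).toNat = i + 1 from by omega]
  have hfold : ((List.range (i + 1)).map (fun m : Nat => bc + (m : Int))).foldl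
      (fun lst cc => PySem.List.pySetD lst (br * n + cc)
        (PySem.List.pyGetD lst (br * n + (cc + 1)) 0)) s
      = (List.range (i + 1)).foldl (pvStep z 1) s := by
    rw [List.foldl_map]
    refine PySem.List.foldl_congr_mem _ _ _ _ ?_
    intro acc m _
    rw [pvStep, show br * n + (bc + (m : Int)) = z + (m : Int) * 1 from by rw [← hz]; ring,
      show br * n + ((bc + (m : Int)) + 1) = z + ((m : Int) + 1) * 1 from by rw [← hz]; ring]
  rw [hinner, hfold]
  simp only [Prod.mk.injEq]
  refine ⟨?_, by rw [← hz]; ring⟩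
  rw [pvShift]
  congr 1
  rw [← hz]; push_cast; ring

lemma pvUpA (s : List Int) (n br bc z : Int) (hz : br * n + bc = z) :
    (PySem.List.pyRange (br - 1) (-1) (-1)).map (fun r =>
      (PySem.List.pySetD ((PySem.List.pyRange br r (-1)).foldl
        (fun lst rr => PySem.List.pySetD lst (rr * n + bc)
          (PySem.List.pyGetD lst ((rr - 1) * n + bc) 0)) s) (r * n + bc) 0, r * n + bc))
    = (List.range br.toNat).map (fun i =>
        (pvShift s z (-n) (i + 1), z + ((i : Int) + 1) * (-n))) := by
  rw [PySem.List.pyRange_neg_one, show (br - 1 - -1).toNat = br.toNat from by omega,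
    List.map_map]
  refine List.map_congr_left (fun i hi => ?_)
  rw [List.mem_range] at hi
  simp only [Function.comp_apply]
  have hinner : PySem.List.pyRange br (br - 1 - (i : Int)) (-1)
      = (List.range (i + 1)).map (fun m : Nat => br - (m : Int)) := by
    rw [PySem.List.pyRange_neg_one,
      show (br - (br - 1 - (i : Int))).toNat = i + 1 from by omega]
  have hfold : ((List.range (i + 1)).map (fun m : Nat => br - (m : Int))).foldl
      (fun lst rr => PySem.List.pySetD lst (rr * n + bc)
        (PySem.List.pyGetD lst ((rr - 1) * n + bc) 0)) s
      = (List.range (i + 1)).foldl (pvStep z (-n)) s := by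
    rw [List.foldl_map]
    refine PySem.List.foldl_congr_mem _ _ _ _ ?_
    intro acc m _
    rw [pvStep, show (br - (m : Int)) * n + bc = z + (m : Int) * (-n) from by rw [← hz]; ring,
      show ((br - (m : Int)) - 1) * n + bc = z + ((m : Int) + 1) * (-n) from by rw [← hz]; ring]
  rw [hinner, hfold]
  simp only [Prod.mk.injEq]
  refine ⟨?_, by rw [← hz]; ring⟩
  rw [pvShift]
  congr 1
  rw [← hz]; push_cast; ring

lemma pvDownA (s : List Int) (n br bc z : Int) (hz : br * n + bc = z) :
    (PySem.List.pyRange (br + 1) n 1).map (fun r =>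
      (PySem.List.pySetD ((PySem.List.pyRange br r 1).foldl
        (fun lst rr => PySem.List.pySetD lst (rr * n + bc)
          (PySem.List.pyGetD lst ((rr + 1) * n + bc) 0)) s) (r * n + bc) 0, r * n + bc))
    = (List.range (n - 1 - br).toNat).map (fun i =>
        (pvShift s z n (i + 1), z + ((i : Int) + 1) * n)) := by
  rw [PySem.List.pyRange_one, show (n - (br + 1)).toNat = (n - 1 - br).toNat from by omega,
    List.map_map]
  refine List.map_congr_left (fun i hi => ?_)
  rw [List.mem_range] at hi
  simp only [Function.comp_apply]
  have hinner : PySem.List.pyRange br (br + 1 + (i : Int)) 1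
      = (List.range (i + 1)).map (fun m : Nat => br + (m : Int)) := by
    rw [PySem.List.pyRange_one,
      show (br + 1 + (i : Int) - br).toNat = i + 1 from by omega]
  have hfold : ((List.range (i + 1)).map (fun m : Nat => br + (m : Int))).foldl
      (fun lst rr => PySem.List.pySetD lst (rr * n + bc)
        (PySem.List.pyGetD lst ((rr + 1) * n + bc) 0)) s
      = (List.range (i + 1)).foldl (pvStep z n) s := by
    rw [List.foldl_map]
    refine PySem.List.foldl_congr_mem _ _ _ _ ?_
    intro acc m _
    rw [pvStep, show (br + (m : Int)) * n + bc = z + (m : Int) * n from by rw [← hz]; ring,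
      show ((br + (m : Int)) + 1) * n + bc = z + ((m : Int) + 1) * n from by rw [← hz]; ring]
  rw [hinner, hfold]
  simp only [Prod.mk.injEq]
  refine ⟨?_, by rw [← hz]; ring⟩
  rw [pvShift]
  congr 1
  rw [← hz]; push_cast; ring

lemma pvIdxOf?_of_mem (l : List Int) (h : (0 : Int) ∈ l) : l.idxOf? 0 = some (l.idxOf 0) := by
  induction l with
  | nil => cases h
  | cons x xs ih =>
    by_cases hx : x = 0
    · simp [List.idxOf?_cons, hx]
    · have hmem : (0 : Int) ∈ xs := by
        rcases List.mem_cons.mp h with h' | h'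
        · exact absurd h'.symm hx
        · exact h'
      simp [List.idxOf?_cons, hx, ih hmem]

-- ===== VERDICT (by name: the statement is the Claim_ definition above) =====
theorem neighbors_segment_py_spec : Claim_equal_neighbors_segment_py := by
  intro state n _hdom hpre
  obtain ⟨hmem, hn0, hrb⟩ := hpre
  unfold Spec_neighbors_segment_py
  have hidx : PySem.List.index? state 0 = some (state.idxOf 0) := by
    rw [PySem.List.index?_eq_idxOf?]
    exact pvIdxOf?_of_mem state hmem
  have hzlt : state.idxOf 0 < state.length := List.idxOf_lt_length_of_mem hmem
  have hzv : state[state.idxOf 0] = 0 := List.getElem_idxOf hzlt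
  have hdm : PySem.Int.divmod? ((state.idxOf 0 : Nat) : Int) n
      = some (PySem.Int.floordiv ((state.idxOf 0 : Nat) : Int) n,
              PySem.Int.mod ((state.idxOf 0 : Nat) : Int) n) := by
    simp [PySem.Int.divmod?, hn0, PySem.Int.floordiv, PySem.Int.mod]
  set z : Int := ((state.idxOf 0 : Nat) : Int) with hzdef
  set br : Int := PySem.Int.floordiv z n with hbrdef
  set bc : Int := PySem.Int.mod z n with hbcdef
  have hzeq : br * n + bc = z := PySem.Int.floordiv_mul_add_mod z n
  have hz0 : 0 ≤ z := by rw [hzdef]; positivity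
  have hzL : z < (state.length : Int) := by rw [hzdef]; exact_mod_cast hzlt
  -- range-validity of every cell the four walks touch
  have hrangeL : ∀ j : Nat, j ≤ bc.toNat →
      0 ≤ z + (j : Int) * (-1) ∧ z + (j : Int) * (-1) < (state.length : Int) := by
    intro j hj
    have he : z + (j : Int) * (-1) = z - (j : Int) := by ring
    rcases lt_or_gt_of_ne hn0 with hn | hn
    · have hb := PySem.Int.mod_neg_bounds z hn
      rw [← hbcdef] at hb
      have : j = 0 := by omega
      subst this
      rw [he]
      constructor <;> omega
    · have hbc0 : 0 ≤ bc := PySem.Int.mod_nonneg z hn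
      have hbr0 : 0 ≤ br := by
        rw [hbrdef]
        exact (PySem.Int.le_floordiv_iff_mul_le hn).mpr (by simpa using hz0)
      have hP : 0 ≤ br * n := mul_nonneg hbr0 hn.le
      have hjb : (j : Int) ≤ bc := by omega
      rw [he]
      constructor <;> linarith
  have hrangeR : ∀ j : Nat, j ≤ (n - 1 - bc).toNat →
      0 ≤ z + (j : Int) * 1 ∧ z + (j : Int) * 1 < (state.length : Int) := by
    intro j hj
    have he : z + (j : Int) * 1 = z + (j : Int) := by ring
    rcases lt_or_gt_of_ne hn0 with hn | hn
    · have hb := PySem.Int.mod_neg_bounds z hn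
      rw [← hbcdef] at hb
      have : j = 0 := by omega
      subst this
      rw [he]
      constructor <;> omega
    · have hbc0 : 0 ≤ bc := PySem.Int.mod_nonneg z hn
      have hbcn : bc < n := PySem.Int.mod_lt z hn
      rcases (hrb hn).1 with hcase | hcase
      · have : j = 0 := by omega
        subst this
        rw [he]
        constructor <;> omega
      · have hjb : (j : Int) ≤ n - 1 - bc := by omega
        rw [he]
        constructor <;> linarith [hzeq]
  have hrangeU : ∀ j : Nat, j ≤ br.toNat →
      0 ≤ z + (j : Int) * (-n) ∧ z + (j : Int) * (-n) < (state.length : Int) := by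
    intro j hj
    have he : z + (j : Int) * (-n) = z - (j : Int) * n := by ring
    rcases lt_or_gt_of_ne hn0 with hn | hn
    · have hb := PySem.Int.mod_neg_bounds z hn
      rw [← hbcdef] at hb
      have hbr0 : br ≤ 0 := by nlinarith [hzeq, hz0, hb.1, hb.2]
      have : j = 0 := by omega
      subst this
      rw [he]
      constructor <;> omega
    · have hbc0 : 0 ≤ bc := PySem.Int.mod_nonneg z hn
      have hbr0 : 0 ≤ br := by
        rw [hbrdef]
        exact (PySem.Int.le_floordiv_iff_mul_le hn).mpr (by simpa using hz0)
      have hjb : (j : Int) ≤ br := by omega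
      have h1 : (j : Int) * n ≤ br * n := mul_le_mul_of_nonneg_right hjb hn.le
      have h2 : 0 ≤ (j : Int) * n := mul_nonneg (by positivity) hn.le
      rw [he]
      constructor <;> linarith [hzeq]
  have hrangeD : ∀ j : Nat, j ≤ (n - 1 - br).toNat →
      0 ≤ z + (j : Int) * n ∧ z + (j : Int) * n < (state.length : Int) := by
    intro j hj
    rcases lt_or_gt_of_ne hn0 with hn | hn
    · have hb := PySem.Int.mod_neg_bounds z hn
      rw [← hbcdef] at hb
      by_cases hK : n - 1 - br ≤ 0
      · have : j = 0 := by omega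
        subst this
        simp only [Nat.cast_zero, zero_mul, add_zero]
        exact ⟨hz0, hzL⟩
      · have hjb : (j : Int) ≤ n - 1 - br := by omega
        have h1 : (n - 1 - br) * n ≤ (j : Int) * n :=
          mul_le_mul_of_nonpos_right hjb hn.le
        have h2 : (j : Int) * n ≤ 0 :=
          mul_nonpos_iff.mpr (Or.inl ⟨Int.natCast_nonneg j, hn.le⟩)
        constructor
        · nlinarith [hzeq, hb.1, sq_nonneg n]
        · linarith
    · have hbc0 : 0 ≤ bc := PySem.Int.mod_nonneg z hn
      rcases (hrb hn).2 with hcase | hcase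
      · have : j = 0 := by omega
        subst this
        simp only [Nat.cast_zero, zero_mul, add_zero]
        exact ⟨hz0, hzL⟩
      · by_cases hK : n - 1 - br ≤ 0
        · have : j = 0 := by omega
          subst this
          simp only [Nat.cast_zero, zero_mul, add_zero]
          exact ⟨hz0, hzL⟩
        · have hjb : (j : Int) ≤ n - 1 - br := by omega
          have h1 : (j : Int) * n ≤ (n - 1 - br) * n :=
            mul_le_mul_of_nonneg_right hjb hn.le
          have h2 : 0 ≤ (j : Int) * n := mul_nonneg (by positivity) hn.le
          constructor
          · linarith
          · nlinarith [hzeq]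
  -- reduce both ports
  unfold neighbors_segment_py neighbors_segment_py_alt
  dsimp only
  rw [hidx]
  dsimp only
  rw [← hzdef, hdm]
  dsimp only
  simp only [List.flatMap_cons, List.flatMap_nil, List.append_nil]
  rw [pvLeftA state n br bc z hzeq, pvRightA state n br bc z hzeq,
    pvUpA state n br bc z hzeq, pvDownA state n br bc z hzeq]
  rw [hzdef] at hrangeL hrangeR hrangeU hrangeD ⊢
  rw [pvDir state (state.idxOf 0) (-1) bc.toNat (by omega) hzlt hzv hrangeL,
    pvDir state (state.idxOf 0) 1 (n - 1 - bc).toNat (by omega) hzlt hzv hrangeR,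
    pvDir state (state.idxOf 0) (-n) br.toNat (by simpa using hn0) hzlt hzv hrangeU,
    pvDir state (state.idxOf 0) n (n - 1 - br).toNat hn0 hzlt hzv hrangeD]
  simp [List.append_assoc]
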